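-- pv_equiv track=rewrite | github.com/MaggieZZY/MyPythonCompiler | lexer.py | isFloatToken
-- ===== SOURCE A (Python) =====
-- def isDigit(c):
--     return '0' <= c <= '9'
--
-- def isFloatToken(s):
--     state = 1
--     finalStates = [4,6]
--     for ch in s:
--         if state == 1:
--             if isDigit(ch) and ch != '0':
--                 state = 2
--             elif ch == '0':
--                 state = 3
--             elif ch == '.':
--                 state = 5
--             else:
--                 return False
--         elif state == 2:
--             if isDigit(ch):
--                 state = 2
--             elif ch == '.':
--                 state = 4
--             else:
--                 return False
--         elif state == 3:
--             if ch == '.':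
--                 state = 4
--             else:
--                 return False
--         elif state == 4:
--             if isDigit(ch):
--                 state = 4
--             else:
--                 return False
--         elif state == 5:
--             if isDigit(ch):
--                 state = 6
--             else:
--                 return False
--         elif state == 6:
--             if isDigit(ch):
--                 state = 6
--             else:
--                 return False
--
--     return (state in finalStates)
-- ===== SOURCE B (Python) =====
-- def isFloatToken(s):
--     if '.' not in s:
--         return False
--     intpart, _, fracpart = s.partition('.')
--     if '.' in fracpart:
--         return False
--     if not all('0' <= c <= '9' for c in fracpart):
--         return False
--     if intpart == '':
--         return fracpart != ''
--     return all('0' <= c <= '9' for c in intpart) and (intpart == '0' or intpart[0] != '0')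
-- ===== Notes on version B (the rewrite author's own statement) =====
-- stated objective: simpler
-- what changed: Replaced the per-character 6-state DFA loop with a split-at-dot decomposition: partition the string at the first '.', then validate the integer and fraction parts with plain all-digit and leading-zero checks.
import Mathlib
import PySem

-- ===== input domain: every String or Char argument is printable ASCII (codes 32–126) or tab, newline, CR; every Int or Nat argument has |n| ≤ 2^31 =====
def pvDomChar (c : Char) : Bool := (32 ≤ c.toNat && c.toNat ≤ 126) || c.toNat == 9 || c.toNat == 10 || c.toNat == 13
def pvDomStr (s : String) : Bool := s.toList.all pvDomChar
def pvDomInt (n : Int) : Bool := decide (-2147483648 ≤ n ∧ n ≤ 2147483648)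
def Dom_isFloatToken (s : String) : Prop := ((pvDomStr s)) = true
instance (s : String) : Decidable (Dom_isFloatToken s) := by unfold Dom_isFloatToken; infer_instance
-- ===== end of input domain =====

-- B replaces A's per-character six-state DFA loop with a partition-at-'.'-and-validate
-- decomposition (same O(n) cost); objective: simpler.

-- ===== PORT A =====
def pvIsDigit (c : Char) : Bool := decide ('0' ≤ c) && decide (c ≤ '9')
def pvALoop (state : Int) (l : List Char) : Bool :=
  match l with
  | [] => state == 4 || state == 6
  | ch :: rest =>
    if state == 1 then
      if pvIsDigit ch && ch != '0' then pvALoop 2 rest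
      else if ch == '0' then pvALoop 3 rest
      else if ch == '.' then pvALoop 5 rest
      else false
    else if state == 2 then
      if pvIsDigit ch then pvALoop 2 rest
      else if ch == '.' then pvALoop 4 rest
      else false
    else if state == 3 then
      if ch == '.' then pvALoop 4 rest
      else false
    else if state == 4 then
      if pvIsDigit ch then pvALoop 4 rest
      else false
    else if state == 5 then
      if pvIsDigit ch then pvALoop 6 rest
      else false
    else if state == 6 then
      if pvIsDigit ch then pvALoop 6 rest
      else false
    else pvALoop state rest


def isFloatToken (s : String) : Bool := pvALoop 1 s.toList

-- ===== PORT B =====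
def pvIsDigitB (c : Char) : Bool := decide ('0' ≤ c) && decide (c ≤ '9')

def pvBalt (l : List Char) : Bool :=
  if l.contains '.' then
    let intpart := l.takeWhile (· ≠ '.')
    let fracpart := (l.dropWhile (· ≠ '.')).drop 1
    if fracpart.contains '.' then false
    else if !(fracpart.all pvIsDigitB) then false
    else if intpart.isEmpty then !fracpart.isEmpty
    else intpart.all pvIsDigitB && (intpart == ['0'] || intpart.head? != some '0')
  else false


-- Source B works on the string; the port works on its character list: s.partition('.') is
-- split-at-first-'.' (takeWhile / dropWhile.drop 1, exact for partition), '.' in s is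
-- l.contains '.', all('0' <= c <= '9' ...) is List.all, intpart == '0' is intpart == ['0'],
-- intpart[0] is intpart.head?.
def isFloatToken_alt (s : String) : Bool := pvBalt s.toList

-- ===== PRECONDITION & SPEC =====
def Spec_isFloatToken (s : String) (out : Bool) : Prop := out = isFloatToken_alt s
instance (s : String) (out : Bool) : Decidable (Spec_isFloatToken s out) := by unfold Spec_isFloatToken; infer_instance

-- ===== CLAIM (what is proved, stated in full; the proofs are below) =====
def Claim_equal_isFloatToken : Prop := ∀ (s : String), Dom_isFloatToken s → Spec_isFloatToken s (isFloatToken s)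

-- ===== LEMMAS AND PROOFS =====

theorem pvALoop_four (l : List Char) : pvALoop 4 l = l.all pvIsDigit := by
  induction l with
  | nil => rfl
  | cons c r ih =>
    simp only [pvALoop, List.all_cons]
    by_cases h : pvIsDigit c = true <;> simp [h, ih]

theorem pvALoop_six (l : List Char) : pvALoop 6 l = l.all pvIsDigit := by
  induction l with
  | nil => rfl
  | cons c r ih =>
    simp only [pvALoop, List.all_cons]
    by_cases h : pvIsDigit c = true <;> simp [h, ih]

theorem pvALoop_five (l : List Char) :
    pvALoop 5 l = (!l.isEmpty && l.all pvIsDigit) := by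
  cases l with
  | nil => rfl
  | cons c r =>
    simp only [pvALoop, List.isEmpty_cons, List.all_cons]
    by_cases h : pvIsDigit c = true <;> simp [h, pvALoop_six]

theorem pvALoop_three (l : List Char) :
    pvALoop 3 l = ((l.head? == some '.') && l.tail.all pvIsDigit) := by
  cases l with
  | nil => rfl
  | cons c r =>
    by_cases h : c = '.'
    · subst h; simp [pvALoop, pvALoop_four]
    · simp [pvALoop, h, List.head?]

theorem pvALoop_two (l : List Char) :
    pvALoop 2 l = (l.contains '.' && (l.takeWhile (· ≠ '.')).all pvIsDigit
                    && ((l.dropWhile (· ≠ '.')).drop 1).all pvIsDigit) := by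
  induction l with
  | nil => rfl
  | cons c r ih =>
    by_cases hc : c = '.'
    · subst hc
      simp [pvALoop, pvALoop_four, pvIsDigit]
    · by_cases hd : pvIsDigit c = true
      · have hne : ('.' == c) = false := by
          simp; intro he; exact hc he.symm
        simp only [pvALoop, hd, if_pos, ih, List.contains_cons, List.takeWhile_cons,
          List.dropWhile_cons, hne]
        by_cases hm : r.contains '.' = true <;> simp [hc, hd]
      · simp [pvALoop, hd, hc]


theorem digit_not_dot {l : List Char} (h : l.all pvIsDigit = true) : l.contains '.' = false := by
  induction l with
  | nil => rfl
  | cons c r ih =>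
    simp only [List.all_cons, Bool.and_eq_true] at h
    have hc : c ≠ '.' := by intro he; subst he; simp [pvIsDigit] at h
    simp only [List.contains_cons, ih h.2, Bool.or_false, beq_eq_false_iff_ne]
    exact fun he => hc he.symm

theorem pvB_eq : pvIsDigitB = pvIsDigit := rfl

theorem tail_all_eq (t : List Char) :
    (!decide ('.' ∈ t) && !decide (∃ x ∈ t, pvIsDigit x = false)) = t.all pvIsDigit := by
  by_cases hall : t.all pvIsDigit = true
  · have hnm := digit_not_dot hall
    simp at hnm
    simp [hall, hnm]
    intro x hx
    exact List.all_eq_true.mp hall x hx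
  · have hf : t.all pvIsDigit = false := by simpa using hall
    obtain ⟨x, hx, hxf⟩ := List.all_eq_false.mp hf
    simp [hf]
    exact fun _ => ⟨x, hx, by simpa using hxf⟩

theorem pvALoop_one_eq_balt (l : List Char) : pvALoop 1 l = pvBalt l := by
  have hdot : pvIsDigit '.' = false := by decide
  cases l with
  | nil => rfl
  | cons c r =>
    by_cases hc : c = '.'
    · -- first char '.', state 5
      subst hc
      simp only [pvALoop, pvBalt, pvB_eq, List.contains_cons, List.takeWhile_cons,
        List.dropWhile_cons, hdot]
      by_cases hall : r.all pvIsDigit = true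
      · have hnm := digit_not_dot hall
        simp at hnm
        simp [hall, pvALoop_five]
        exact fun _ => hnm
      · simp [hall, pvALoop_five]
    · by_cases hd : pvIsDigit c = true
      · by_cases h0 : c = '0'
        · -- first char '0', state 3
          subst h0
          simp only [pvALoop, pvBalt, pvB_eq, List.contains_cons, List.takeWhile_cons,
            List.dropWhile_cons, pvALoop_three, hd]
          norm_num
          cases r with
          | nil => simp
          | cons c2 r2 =>
            by_cases hc2 : c2 = '.'
            · subst hc2
              simp only [List.takeWhile_cons, List.dropWhile_cons]
              by_cases hall : r2.all pvIsDigit = true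
              · have hnm := digit_not_dot hall
                simp at hnm
                have hall' := hall
                simp only [List.all_eq_true, pvIsDigit, Bool.and_eq_true,
                  decide_eq_true_eq] at hall'
                simp [hall, List.head?]
                exact ⟨hnm, fun x hx => by simpa [pvIsDigit] using (List.all_eq_true.mp hall) x hx, by decide⟩
              · simp [hall, List.head?]
                intro _ h
                exact absurd (by simpa [List.all_eq_true] using h) hall
            · have hne : ('.' == c2) = false := by simp; intro he; exact hc2 he.symm
              simp only [List.takeWhile_cons]
              by_cases hm : (c2 :: r2).contains '.' = true
              · simp only [List.contains_cons] at hm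
                simp [hc2, List.head?]
              · simp only [List.contains_cons] at hm
                simp [hc2, List.head?]
        · -- first char a nonzero digit, state 2
          have hne : ('.' == c) = false := by simp; intro he; exact hc he.symm
          simp only [pvALoop, pvBalt, pvB_eq, List.contains_cons, List.takeWhile_cons,
            List.dropWhile_cons, hne, pvALoop_two, hd]
          norm_num
          by_cases hm : r.contains '.' = true
          · simp at hm
            simp [hm, hd, hc, h0, List.head?]
            rw [← Bool.and_assoc, tail_all_eq, Bool.and_comm]
            have hb : (some c != some '0') = true := by simp [h0]
            simp [hb]
          · simp at hm
            simp [hm, h0, hc]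
      · -- first char rejects
        have hne : ('.' == c) = false := by simp; intro he; exact hc he.symm
        have h0 : c ≠ '0' := by intro he; subst he; exact hd (by decide)
        simp only [pvALoop, pvBalt, pvB_eq, List.contains_cons, List.takeWhile_cons, hne]
        simp only [hd]
        norm_num [hc, h0]
        by_cases hm : r.contains '.' = true
        · simp at hm
          simp [hm, hd]
        · simp at hm
          simp [hm]

-- ===== VERDICT (by name: the statement is the Claim_ definition above) =====
theorem isFloatToken_spec : Claim_equal_isFloatToken := by
  intro s _
  unfold Spec_isFloatToken isFloatToken isFloatToken_alt
  exact pvALoop_one_eq_balt s.toList
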